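-- pv_equiv track=rewrite | github.com/JFConselt/AGIL_CONSELT | modules/atas/page_atas.py | merge_corrected_pautas
-- ===== SOURCE A (Python) =====
-- def merge_corrected_pautas(current_pautas, corrected_pautas):
--     corrected_by_id = {
--         pauta.get("id"): pauta.get("texto", "")
--         for pauta in corrected_pautas
--         if pauta.get("id")
--     }
--     merged = []
--     for pauta in current_pautas:
--         updated = dict(pauta)
--         if pauta.get("id") in corrected_by_id:
--             updated["texto"] = corrected_by_id[pauta["id"]]
--         merged.append(updated)
--     return merged
-- ===== SOURCE B (Python) =====
-- def merge_corrected_pautas(current_pautas, corrected_pautas):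
--     merged = [dict(p) for p in current_pautas]
--     for c in corrected_pautas:
--         cid = c.get("id")
--         if cid:
--             texto = c.get("texto", "")
--             for i, p in enumerate(current_pautas):
--                 if p.get("id") == cid:
--                     merged[i]["texto"] = texto
--     return merged
-- ===== Notes on version B (the rewrite author's own statement) =====
-- stated objective: alternative
-- what changed: Inverts the join direction: instead of indexing corrections by id and mapping over current pautas, B first copies all current pautas into the result and then lets each correction (in order) patch, in place, every positional slot whose current pauta has the matching truthy id, so last-wins falls out of iteration order instead of dict overwriting.
import Mathlib
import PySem

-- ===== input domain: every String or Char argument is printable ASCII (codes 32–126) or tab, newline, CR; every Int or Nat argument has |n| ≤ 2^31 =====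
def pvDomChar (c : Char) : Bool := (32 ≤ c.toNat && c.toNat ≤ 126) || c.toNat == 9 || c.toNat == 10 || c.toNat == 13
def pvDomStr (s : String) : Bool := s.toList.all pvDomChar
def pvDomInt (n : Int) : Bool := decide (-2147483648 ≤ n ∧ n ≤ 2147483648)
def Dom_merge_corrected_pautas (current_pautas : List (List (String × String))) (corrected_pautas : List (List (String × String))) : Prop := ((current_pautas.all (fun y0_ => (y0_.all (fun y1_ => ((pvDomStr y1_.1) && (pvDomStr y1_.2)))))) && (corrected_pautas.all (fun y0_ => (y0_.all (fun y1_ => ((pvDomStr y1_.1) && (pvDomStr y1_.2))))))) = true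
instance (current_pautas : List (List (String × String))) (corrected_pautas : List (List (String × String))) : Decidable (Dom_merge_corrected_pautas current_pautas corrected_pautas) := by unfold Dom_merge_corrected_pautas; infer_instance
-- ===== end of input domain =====

-- B inverts the join direction: it copies current_pautas and then lets each correction, in order, patch every positional slot with a matching truthy id (alternative decomposition, same return value).

-- ===== PORT A =====
-- the dict comprehension: last-wins dict of truthy id -> texto
def pvCorrectedById (corrected_pautas : List (List (String × String))) : PySem.Dict String String :=
  corrected_pautas.foldl (fun d p =>
    match (PySem.Dict.mk p).get? "id" with
    | some i => if i ≠ "" then d.insert i ((PySem.Dict.mk p).getD "texto" "") else d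
    | none => d) PySem.Dict.empty

def merge_corrected_pautas (current_pautas : List (List (String × String))) (corrected_pautas : List (List (String × String))) : List (List (String × String)) :=
  let corrected_by_id := pvCorrectedById corrected_pautas
  current_pautas.foldl (fun merged pauta =>
    let updated := pauta  -- dict(pauta): a copy
    let updated :=
      match (PySem.Dict.mk pauta).get? "id" with
      | some i =>
          if corrected_by_id.contains i then
            ((PySem.Dict.mk updated).insert "texto" (corrected_by_id.getD i "")).items
          else updated
      | none => updated   -- None is never a key of corrected_by_id
    merged ++ [updated]) []

-- ===== PORT B =====
-- the inner 'for i, p in enumerate(current_pautas): if p.get("id") == cid: merged[i]["texto"] = texto'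
def pvPatch (cid texto : String) (current_pautas merged : List (List (String × String))) : List (List (String × String)) :=
  (merged.zip current_pautas).map (fun mp =>
    if (PySem.Dict.mk mp.2).get? "id" = some cid then ((PySem.Dict.mk mp.1).insert "texto" texto).items else mp.1)

def merge_corrected_pautas_alt (current_pautas : List (List (String × String))) (corrected_pautas : List (List (String × String))) : List (List (String × String)) :=
  let merged := current_pautas  -- [dict(p) for p in current_pautas]: copies
  corrected_pautas.foldl (fun merged c =>
    match (PySem.Dict.mk c).get? "id" with
    | some cid =>
        if cid ≠ "" then pvPatch cid ((PySem.Dict.mk c).getD "texto" "") current_pautas merged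
        else merged
    | none => merged) merged

-- ===== PRECONDITION & SPEC =====
def Spec_merge_corrected_pautas (current_pautas : List (List (String × String))) (corrected_pautas : List (List (String × String))) (out : List (List (String × String))) : Prop := out = merge_corrected_pautas_alt current_pautas corrected_pautas
instance (current_pautas : List (List (String × String))) (corrected_pautas : List (List (String × String))) (out : List (List (String × String))) : Decidable (Spec_merge_corrected_pautas current_pautas corrected_pautas out) := by unfold Spec_merge_corrected_pautas; infer_instance

-- ===== CLAIM (what is proved, stated in full; the proofs are below) =====
def Claim_equal_merge_corrected_pautas : Prop := ∀ (current_pautas : List (List (String × String))) (corrected_pautas : List (List (String × String))), Dom_merge_corrected_pautas current_pautas corrected_pautas → Spec_merge_corrected_pautas current_pautas corrected_pautas (merge_corrected_pautas current_pautas corrected_pautas)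

-- ===== LEMMAS AND PROOFS =====

-- texto of the LAST corrected pauta whose id equals i (none if no match): the common characterisation
def pvLastTexto (i : String) (corrected_pautas : List (List (String × String))) : Option String :=
  corrected_pautas.foldl (fun acc c =>
    if (PySem.Dict.mk c).get? "id" = some i then some ((PySem.Dict.mk c).getD "texto" "") else acc) none

-- what one output row is, as a function of the input row
def pvFix (cor : List (List (String × String))) (pauta : List (String × String)) : List (String × String) :=
  match (PySem.Dict.mk pauta).get? "id" with
  | some i =>
      if i ≠ "" then
        match pvLastTexto i cor with
        | some t => ((PySem.Dict.mk pauta).insert "texto" t).items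
        | none => pauta
      else pauta
  | none => pauta

-- A's dict lookup at a truthy key i equals the last-match scan.
theorem pv_get_fold (i : String) (hi : i ≠ "") :
    ∀ (cor : List (List (String × String))) (d : PySem.Dict String String) (acc : Option String),
      d.get? i = acc →
      (cor.foldl (fun d p =>
          match (PySem.Dict.mk p).get? "id" with
          | some j => if j ≠ "" then d.insert j ((PySem.Dict.mk p).getD "texto" "") else d
          | none => d) d).get? i
      = cor.foldl (fun acc c =>
          if (PySem.Dict.mk c).get? "id" = some i then some ((PySem.Dict.mk c).getD "texto" "") else acc) acc := by
  intro cor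
  induction cor with
  | nil => intro d acc h; simpa using h
  | cons c cor ih =>
    intro d acc h
    simp only [List.foldl_cons]
    cases hc : (PySem.Dict.mk c).get? "id" with
    | none =>
      dsimp only
      rw [if_neg (by simp)]
      exact ih d acc h
    | some j =>
      dsimp only
      by_cases hj : j = ""
      · subst hj
        rw [if_neg (by simp), if_neg (by simp [hi.symm])]
        exact ih d acc h
      · rw [if_pos hj]
        by_cases hji : j = i
        · subst hji
          rw [if_pos rfl]
          exact ih _ _ (PySem.Dict.get?_insert_self _ _ _)
        · rw [if_neg (fun hcon => hji (Option.some.inj hcon))]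
          refine ih _ acc ?_
          rw [PySem.Dict.get?_insert_of_ne _ _ (fun h' => hji h'.symm)]
          exact h

theorem pv_lookup (i : String) (hi : i ≠ "") (cor : List (List (String × String))) :
    (pvCorrectedById cor).get? i = pvLastTexto i cor := by
  unfold pvCorrectedById pvLastTexto
  exact pv_get_fold i hi cor PySem.Dict.empty none (by simp)

theorem pv_contains_empty_key (cor : List (List (String × String))) :
    (pvCorrectedById cor).get? "" = none := by
  unfold pvCorrectedById
  induction cor using List.reverseRecOn with
  | nil => simp
  | append_singleton cor c ih =>
    simp only [List.foldl_append, List.foldl_cons, List.foldl_nil]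
    cases hc : (PySem.Dict.mk c).get? "id" with
    | none => dsimp only; exact ih
    | some j =>
      dsimp only
      by_cases hj : j = ""
      · rw [if_neg (by simp [hj])]
        exact ih
      · rw [if_pos hj, PySem.Dict.get?_insert_of_ne _ _ (fun h => hj h.symm)]
        exact ih

-- A's loop produces exactly pvFix of each row.
theorem pv_A_map (cur cor : List (List (String × String))) :
    merge_corrected_pautas cur cor = cur.map (pvFix cor) := by
  unfold merge_corrected_pautas
  rw [PySem.List.foldl_append_singleton_eq_map]
  apply List.map_congr_left
  intro pauta _
  unfold pvFix
  cases hp : (PySem.Dict.mk pauta).get? "id" with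
  | none => simp
  | some i =>
    by_cases hi : i = ""
    · subst hi
      simp only [if_neg (by simp : ¬ ("" : String) ≠ "")]
      rw [PySem.Dict.contains_eq_isSome_get?, pv_contains_empty_key]
      simp
    · simp only [if_pos hi]
      rw [PySem.Dict.contains_eq_isSome_get?, pv_lookup i hi cor]
      cases ht : pvLastTexto i cor with
      | none => simp
      | some t =>
        simp only [Option.isSome_some, if_pos trivial]
        rw [PySem.Dict.getD_eq_get?_getD, pv_lookup i hi cor, ht]
        rfl

theorem pvLastTexto_append_single (i : String) (cs : List (List (String × String)))
    (c : List (String × String)) :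
    pvLastTexto i (cs ++ [c])
      = if (PySem.Dict.mk c).get? "id" = some i
        then some ((PySem.Dict.mk c).getD "texto" "")
        else pvLastTexto i cs := by
  unfold pvLastTexto
  rw [List.foldl_append]
  rfl

-- pvFix ignores an appended correction whose id does not match the row's truthy id
theorem pvFix_append_of_ne (cs : List (List (String × String))) (c : List (String × String))
    (p : List (String × String))
    (h : ∀ i : String, (PySem.Dict.mk p).get? "id" = some i → i ≠ "" →
        ¬ (PySem.Dict.mk c).get? "id" = some i) :
    pvFix (cs ++ [c]) p = pvFix cs p := by
  unfold pvFix
  cases hp : (PySem.Dict.mk p).get? "id" with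
  | none => rfl
  | some i =>
    dsimp only
    by_cases hi : i = ""
    · simp [hi]
    · simp only [if_pos hi]
      rw [pvLastTexto_append_single, if_neg (h i hp hi)]

-- the two rewritings of pvFix used by the patching step
theorem pvFix_eq_insert (cor : List (List (String × String))) (p : List (String × String))
    (i t : String) (hp : (PySem.Dict.mk p).get? "id" = some i) (hi : i ≠ "")
    (ht : pvLastTexto i cor = some t) :
    pvFix cor p = ((PySem.Dict.mk p).insert "texto" t).items := by
  unfold pvFix
  rw [hp]
  dsimp only
  rw [if_pos hi, ht]

theorem pvFix_insert_texto (cs : List (List (String × String))) (p : List (String × String))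
    (i t : String) (hp : (PySem.Dict.mk p).get? "id" = some i) (hi : i ≠ "") :
    (PySem.Dict.mk (pvFix cs p)).insert "texto" t = (PySem.Dict.mk p).insert "texto" t := by
  unfold pvFix
  rw [hp]
  dsimp only
  rw [if_pos hi]
  cases ht : pvLastTexto i cs with
  | none => rfl
  | some t0 =>
    dsimp only
    rw [show PySem.Dict.mk (((PySem.Dict.mk p).insert "texto" t0).items)
        = (PySem.Dict.mk p).insert "texto" t0 from rfl,
      PySem.Dict.insert_insert_self]

-- mapping over a zip of a mapped list with the original list
theorem pv_zip_map {α β γ : Type} (l : List α) (f : α → β) (h : β × α → γ) :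
    ((l.map f).zip l).map h = l.map (fun x => h (f x, x)) := by
  induction l with
  | nil => rfl
  | cons x l ih => simp [ih]

-- one patching pass over the already-fixed rows advances pvFix by one correction
theorem pv_patch_step (cur cs : List (List (String × String))) (c : List (String × String))
    (cid : String) (hc : (PySem.Dict.mk c).get? "id" = some cid) (hcid : cid ≠ "") :
    pvPatch cid ((PySem.Dict.mk c).getD "texto" "") cur (cur.map (pvFix cs))
      = cur.map (pvFix (cs ++ [c])) := by
  unfold pvPatch
  rw [pv_zip_map]
  apply List.map_congr_left
  intro p _
  dsimp only
  by_cases hp : (PySem.Dict.mk p).get? "id" = some cid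
  · rw [if_pos hp, pvFix_insert_texto cs p cid _ hp hcid,
      pvFix_eq_insert (cs ++ [c]) p cid _ hp hcid
        (by rw [pvLastTexto_append_single, if_pos hc])]
  · rw [if_neg hp]
    exact (pvFix_append_of_ne cs c p (fun i hpi hi hic => by
      rw [hc] at hic
      exact hp (by rw [hpi, Option.some.inj hic]))).symm

-- B's fold, started from any already-fixed state, stays pointwise fixed.
theorem pv_fold_patch (cur : List (List (String × String))) :
    ∀ (cor cs init : List (List (String × String))),
      init = cur.map (pvFix cs) →
      cor.foldl (fun merged c =>
          match (PySem.Dict.mk c).get? "id" with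
          | some cid =>
              if cid ≠ "" then pvPatch cid ((PySem.Dict.mk c).getD "texto" "") cur merged
              else merged
          | none => merged) init
      = cur.map (pvFix (cs ++ cor)) := by
  intro cor
  induction cor with
  | nil => intro cs init h; simpa using h
  | cons c cor ih =>
    intro cs init h
    rw [List.foldl_cons, h]
    have hstep : (match (PySem.Dict.mk c).get? "id" with
        | some cid =>
            if cid ≠ "" then pvPatch cid ((PySem.Dict.mk c).getD "texto" "") cur (cur.map (pvFix cs))
            else cur.map (pvFix cs)
        | none => cur.map (pvFix cs)) = cur.map (pvFix (cs ++ [c])) := by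
      cases hc : (PySem.Dict.mk c).get? "id" with
      | none =>
        dsimp only
        exact (List.map_congr_left (fun p _ =>
          (pvFix_append_of_ne cs c p (fun i _ _ hic => by rw [hc] at hic; simp at hic)).symm))
      | some cid =>
        dsimp only
        by_cases hcid : cid = ""
        · subst hcid
          rw [if_neg (by simp)]
          exact (List.map_congr_left (fun p _ =>
            (pvFix_append_of_ne cs c p (fun i _ hi hic => by
              rw [hc] at hic
              exact hi (Option.some.inj hic).symm)).symm))
        · rw [if_pos hcid]
          exact pv_patch_step cur cs c cid hc hcid
    rw [hstep, ih (cs ++ [c]) _ rfl, List.append_assoc]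
    rfl

theorem pvFix_nil (p : List (String × String)) : pvFix [] p = p := by
  unfold pvFix
  cases (PySem.Dict.mk p).get? "id" with
  | none => rfl
  | some i => by_cases hi : i = "" <;> simp [hi, pvLastTexto]

theorem pv_B_map (cur cor : List (List (String × String))) :
    merge_corrected_pautas_alt cur cor = cur.map (pvFix cor) := by
  show (cor.foldl (fun merged c =>
      match (PySem.Dict.mk c).get? "id" with
      | some cid =>
          if cid ≠ "" then pvPatch cid ((PySem.Dict.mk c).getD "texto" "") cur merged
          else merged
      | none => merged) cur) = cur.map (pvFix cor)
  rw [pv_fold_patch cur cor [] cur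
      (by rw [List.map_congr_left (fun p _ => pvFix_nil p)]; exact (List.map_id cur).symm)]
  simp

-- ===== VERDICT (by name: the statement is the Claim_ definition above) =====
theorem merge_corrected_pautas_spec : Claim_equal_merge_corrected_pautas := by
  intro cur cor _
  unfold Spec_merge_corrected_pautas
  rw [pv_A_map, pv_B_map]
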